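-- pv_equiv track=rewrite | github.com/TimLai666/skills | product-conjoint-analysis/scripts/compute_insights.py | _looks_like_independent_binaries
-- ===== SOURCE A (Python) =====
-- def _looks_like_independent_binaries(predictors: list[str]) -> bool:
--     """
--     Heuristic: predictors that look like independent binary feature flags
--     (e.g., "anti_scratch", "uv_protection") rather than dummy levels of a
--     single categorical (e.g., "size_145", "size_162" sharing the "size_" prefix).
--     """
--     # If they share a common prefix, they're likely dummies of one categorical
--     common_prefix_chars = 0
--     if len(predictors) < 2:
--         return False
--     p0 = predictors[0]
--     for i in range(min(len(p) for p in predictors)):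
--         if all(p[i] == p0[i] for p in predictors):
--             common_prefix_chars += 1
--         else:
--             break
--     # Common prefix > 3 chars suggests they're related dummies
--     return common_prefix_chars <= 3
-- ===== SOURCE B (Python) =====
-- def _lcp(a, b):
--     k = 0
--     n = min(len(a), len(b))
--     while k < n and a[k] == b[k]:
--         k += 1
--     return a[:k]
--
--
-- def _looks_like_independent_binaries(predictors: list[str]) -> bool:
--     if len(predictors) < 2:
--         return False
--     run = predictors[0]
--     for p in predictors[1:]:
--         run = _lcp(run, p)
--     return len(run) <= 3
-- ===== Notes on version B (the rewrite author's own statement) =====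
-- stated objective: alternative
-- what changed: Replaces A's column-wise scan (for each index up to the minimum length, check every string against predictors[0] with an all(...) pass, break at first mismatch) by a row-wise left fold that maintains the running common prefix, shrinking it with each successive string, then compares its length to 3.
import Mathlib
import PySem

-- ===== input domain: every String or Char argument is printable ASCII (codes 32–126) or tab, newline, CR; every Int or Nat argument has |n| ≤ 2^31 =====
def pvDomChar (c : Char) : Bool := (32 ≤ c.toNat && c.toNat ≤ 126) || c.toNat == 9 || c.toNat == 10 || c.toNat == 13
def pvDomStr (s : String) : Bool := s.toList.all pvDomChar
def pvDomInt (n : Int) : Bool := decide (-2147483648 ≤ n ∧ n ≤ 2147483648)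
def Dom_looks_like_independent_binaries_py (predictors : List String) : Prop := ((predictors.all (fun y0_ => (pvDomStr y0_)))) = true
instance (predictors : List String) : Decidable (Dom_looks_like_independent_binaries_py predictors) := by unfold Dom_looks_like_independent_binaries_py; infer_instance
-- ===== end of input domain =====

-- B replaces A's column-wise all-strings scan by a left fold maintaining the running
-- common prefix (objective: alternative decomposition, same asymptotic cost).

-- ===== PORT A =====
-- the `for i in range(m): if all(...): cp += 1 else: break` loop of A
def aLoop (ps : List String) (p0 : String) : List Int → Nat
  | [] => 0
  | i :: restIdx =>
      if ps.all (fun p => PySem.Str.pyGet? p i == PySem.Str.pyGet? p0 i)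
      then 1 + aLoop ps p0 restIdx
      else 0

def looks_like_independent_binaries_py (predictors : List String) : Bool :=
  if predictors.length < 2 then false
  else
    match PySem.List.pyGet? predictors 0,
          PySem.List.min? (predictors.map PySem.Str.len) (fun y => y) with
    | some p0, some m =>
        decide (aLoop predictors p0 (PySem.List.pyRange 0 m 1) ≤ 3)
    | _, _ => false

-- ===== PORT B =====
-- the `while k < n and a[k] == b[k]: k += 1` counter of Source B's _lcp
def lcpCount : List Char → List Char → Nat
  | x :: a, y :: b => if x = y then 1 + lcpCount a b else 0
  | _, _ => 0

-- Source B's _lcp: count matching leading chars, then a[:k]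
def lcpChars (a b : List Char) : List Char := a.take (lcpCount a b)

def looks_like_independent_binaries_py_alt (predictors : List String) : Bool :=
  match predictors with
  | p0 :: p1 :: rest =>
      decide (((p1 :: rest).foldl (fun run p => lcpChars run p.toList) p0.toList).length ≤ 3)
  | _ => false

-- ===== PRECONDITION & SPEC =====
def Spec_looks_like_independent_binaries_py (predictors : List String) (out : Bool) : Prop := out = looks_like_independent_binaries_py_alt predictors
instance (predictors : List String) (out : Bool) : Decidable (Spec_looks_like_independent_binaries_py predictors out) := by unfold Spec_looks_like_independent_binaries_py; infer_instance

-- ===== CLAIM (what is proved, stated in full; the proofs are below) =====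
def Claim_equal_looks_like_independent_binaries_py : Prop := ∀ (predictors : List String), Dom_looks_like_independent_binaries_py predictors → Spec_looks_like_independent_binaries_py predictors (looks_like_independent_binaries_py predictors)

-- ===== LEMMAS AND PROOFS =====

theorem lcpCount_le_right (a b : List Char) : lcpCount a b ≤ b.length := by
  induction a generalizing b with
  | nil => simp [lcpCount]
  | cons x a ih =>
    cases b with
    | nil => simp [lcpCount]
    | cons y b =>
      simp only [lcpCount, List.length_cons]
      have := ih b
      split_ifs <;> omega

theorem lcpCount_take (a c : List Char) (k : Nat) :
    lcpCount (a.take k) c = min k (lcpCount a c) := by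
  induction a generalizing c k with
  | nil => simp [lcpCount]
  | cons x a ih =>
    cases c with
    | nil => simp [lcpCount]
    | cons y c =>
      cases k with
      | zero => simp [lcpCount]
      | succ k =>
        simp only [List.take_succ_cons, lcpCount]
        split_ifs
        · rw [ih]; omega
        · simp

theorem lcpCount_agree (a b : List Char) (i : Nat) (h : i < lcpCount a b) :
    b[i]? = a[i]? := by
  induction a generalizing b i with
  | nil => simp [lcpCount] at h
  | cons x a ih =>
    cases b with
    | nil => simp [lcpCount] at h
    | cons y b =>
      simp only [lcpCount] at h
      split_ifs at h with hxy
      · cases i with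
        | zero => simp [hxy]
        | succ i => simpa using ih b i (by omega)
      · omega

theorem lcpCount_mismatch (a b : List Char) (ha : lcpCount a b < a.length)
    (hb : lcpCount a b < b.length) : b[lcpCount a b]? ≠ a[lcpCount a b]? := by
  induction a generalizing b with
  | nil => simp at ha
  | cons x a ih =>
    cases b with
    | nil => simp at hb
    | cons y b =>
      by_cases hxy : x = y
      · have hc : lcpCount (x :: a) (y :: b) = 1 + lcpCount a b := by
          simp [lcpCount, hxy]
        rw [hc] at ha hb ⊢
        simp only [List.length_cons] at ha hb
        have := ih b (by omega) (by omega)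
        simpa [Nat.add_comm 1 (lcpCount a b)] using this
      · have hc : lcpCount (x :: a) (y :: b) = 0 := by simp [lcpCount, hxy]
        rw [hc]
        simp only [List.getElem?_cons_zero, ne_eq, Option.some.injEq]
        exact fun h => hxy h.symm

-- generic facts about a running minimum
theorem foldl_min_le_init (l : List Nat) (n : Nat) : l.foldl min n ≤ n := by
  induction l generalizing n with
  | nil => simp
  | cons x l ih => exact le_trans (ih _) (by omega)

theorem foldl_min_le_mem (l : List Nat) (n x : Nat) (hx : x ∈ l) : l.foldl min n ≤ x := by
  induction l generalizing n with
  | nil => simp at hx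
  | cons y l ih =>
    simp only [List.foldl_cons]
    rcases List.mem_cons.mp hx with h | h
    · subst h; exact le_trans (foldl_min_le_init _ _) (min_le_right _ _)
    · exact ih _ h

theorem le_foldl_min (l : List Nat) (n k : Nat) (hn : k ≤ n) (hl : ∀ x ∈ l, k ≤ x) :
    k ≤ l.foldl min n := by
  induction l generalizing n with
  | nil => simpa
  | cons y l ih =>
    simp only [List.foldl_cons]
    exact ih _ (le_min hn (hl y (by simp))) (fun x hx => hl x (by simp [hx]))

theorem foldl_min_cases (l : List Nat) (n : Nat) :
    l.foldl min n = n ∨ ∃ x ∈ l, l.foldl min n = x := by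
  induction l generalizing n with
  | nil => exact Or.inl rfl
  | cons y l ih =>
    simp only [List.foldl_cons]
    rcases ih (min n y) with h | ⟨x, hx, h⟩
    · rcases le_total n y with hle | hle
      · exact Or.inl (h.trans (min_eq_left hle))
      · exact Or.inr ⟨y, List.mem_cons_self, h.trans (min_eq_right hle)⟩
    · exact Or.inr ⟨x, List.mem_cons_of_mem _ hx, h⟩

-- running prefix of B as a take of the first string
theorem foldB (a : List Char) (ts : List (List Char)) (n : Nat) :
    ts.foldl (fun run t => lcpChars run t) (a.take n)
      = a.take ((ts.map (lcpCount a)).foldl min n) := by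
  induction ts generalizing n with
  | nil => simp
  | cons t ts ih =>
    simp only [List.foldl_cons, List.map_cons]
    have h1 : lcpChars (a.take n) t = a.take (min n (lcpCount a t)) := by
      simp [lcpChars, lcpCount_take, List.take_take]
    rw [h1, ih]

-- the counting loop of A, over the range [k, M'), returns N - k for k ≤ N
theorem aLoop_eq (p0 : String) (rest : List String) (M' : Nat)
    (N : Nat) (hN : N = ((rest.map String.toList).map (lcpCount p0.toList)).foldl min p0.toList.length)
    (hNM : N ≤ M') (hMa : M' ≤ p0.toList.length)
    (hMt : ∀ t ∈ rest.map String.toList, M' ≤ t.length) :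
    ∀ f k : Nat, M' - k = f → k ≤ N →
      aLoop (p0 :: rest) p0 (PySem.List.pyRange (k : Int) (M' : Int) 1) = N - k := by
  intro f
  induction f with
  | zero =>
    intro k hf hk
    have hMk : M' ≤ k := by omega
    have : N = k := by omega
    rw [PySem.List.pyRange_one_eq_nil (by exact_mod_cast hMk)]
    simp [aLoop]; omega
  | succ f ihf =>
    intro k hf hk
    have hkM : k < M' := by omega
    rw [PySem.List.pyRange_one_cons (by exact_mod_cast hkM)]
    by_cases hkN : k < N
    · have hall : (p0 :: rest).all
          (fun p => PySem.Str.pyGet? p (k : Int) == PySem.Str.pyGet? p0 (k : Int)) = true := by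
        apply List.all_eq_true.mpr
        intro p hp
        rcases List.mem_cons.mp hp with rfl | hp
        · simp
        · have hmem : p.toList ∈ rest.map String.toList := List.mem_map_of_mem hp
          have hle : N ≤ lcpCount p0.toList p.toList := by
            rw [hN]; exact foldl_min_le_mem _ _ _ (List.mem_map_of_mem hmem)
          have hag := lcpCount_agree p0.toList p.toList k (by omega)
          simp only [beq_iff_eq, PySem.Str.pyGet?_natCast]
          exact hag
      rw [aLoop, if_pos hall]
      have hcast : ((k : Int) + 1) = ((k + 1 : Nat) : Int) := by push_cast; ring
      rw [hcast, ihf (k + 1) (by omega) (by omega)]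
      omega
    · -- k = N < M' : some string mismatches at position N = k
      obtain rfl : N = k := by omega
      rcases foldl_min_cases ((rest.map String.toList).map (lcpCount p0.toList)) p0.toList.length with hcase | ⟨x, hx, hcase⟩
      · omega
      · rcases List.mem_map.mp hx with ⟨t, ht, rfl⟩
        have hNt : lcpCount p0.toList t = N := by omega
        have hmis := lcpCount_mismatch p0.toList t (by omega)
          (by rw [hNt]; exact lt_of_lt_of_le hkM (hMt t ht))
        rw [hNt] at hmis
        rcases List.mem_map.mp ht with ⟨p, hp, rfl⟩
        have hbad : ¬ ((p0 :: rest).all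
            (fun q => PySem.Str.pyGet? q (N : Int) == PySem.Str.pyGet? p0 (N : Int)) = true) := by
          intro hcontra
          have := List.all_eq_true.mp hcontra p (by simp [hp])
          simp only [beq_iff_eq, PySem.Str.pyGet?_natCast] at this
          exact hmis this
        rw [aLoop, if_neg hbad]
        omega

-- Python ints: min of the (nonnegative) lengths, as a Nat
theorem foldl_min_len_cast (ss : List String) (x : Nat) :
    (ss.map PySem.Str.len).foldl min ((x : Nat) : Int)
      = (((ss.map (fun s => s.toList.length)).foldl min x : Nat) : Int) := by
  induction ss generalizing x with
  | nil => simp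
  | cons s ss ih =>
    simp only [List.map_cons, List.foldl_cons]
    rw [PySem.Str.len_eq, ← Nat.cast_min, ih]

-- ===== VERDICT (by name: the statement is the Claim_ definition above) =====
theorem looks_like_independent_binaries_py_spec : Claim_equal_looks_like_independent_binaries_py := by
  intro predictors _
  unfold Spec_looks_like_independent_binaries_py
  match predictors with
  | [] => rfl
  | [p] => rfl
  | p0 :: p1 :: rest =>
    have hlen : ¬ (p0 :: p1 :: rest).length < 2 := by simp
    rw [looks_like_independent_binaries_py, if_neg hlen]
    rw [show PySem.List.pyGet? (p0 :: p1 :: rest) 0 = some p0 from PySem.List.pyGet?_zero_cons _ _]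
    rw [show ((p0 :: p1 :: rest).map PySem.Str.len) = PySem.Str.len p0 :: ((p1 :: rest).map PySem.Str.len) from rfl]
    rw [PySem.List.min?_id_cons]
    -- the minimum length M' as a Nat
    set M' : Nat := ((p1 :: rest).map (fun s => s.toList.length)).foldl min p0.toList.length with hM'
    have hmin : ((p1 :: rest).map PySem.Str.len).foldl min (PySem.Str.len p0) = (M' : Int) := by
      rw [PySem.Str.len_eq]
      exact foldl_min_len_cast (p1 :: rest) p0.toList.length
    rw [hmin]
    -- N = length of the common prefix maintained by B
    set N : Nat := (((p1 :: rest).map String.toList).map (lcpCount p0.toList)).foldl min p0.toList.length with hNdef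
    have hMa : M' ≤ p0.toList.length := foldl_min_le_init _ _
    have hMt : ∀ t ∈ (p1 :: rest).map String.toList, M' ≤ t.length := by
      intro t ht
      exact foldl_min_le_mem _ _ _ (by
        rcases List.mem_map.mp ht with ⟨p, hp, rfl⟩
        exact List.mem_map.mpr ⟨p, hp, rfl⟩)
    have hNM : N ≤ M' := by
      apply le_foldl_min
      · exact foldl_min_le_init _ _
      · intro x hx
        rcases List.mem_map.mp hx with ⟨s, hs, rfl⟩
        refine le_trans (foldl_min_le_mem _ _ (lcpCount p0.toList s.toList) ?_) (lcpCount_le_right _ _)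
        exact List.mem_map_of_mem (List.mem_map_of_mem hs)
    have hNa : N ≤ p0.toList.length := by rw [hNdef]; exact foldl_min_le_init _ _
    have hA : aLoop (p0 :: p1 :: rest) p0 (PySem.List.pyRange ((0 : Nat) : Int) (M' : Int) 1) = N - 0 :=
      aLoop_eq p0 (p1 :: rest) M' N hNdef hNM hMa hMt (M' - 0) 0 rfl (by omega)
    have hB : ((p1 :: rest).foldl (fun run p => lcpChars run p.toList) p0.toList).length = N := by
      have h0 : (p1 :: rest).foldl (fun run p => lcpChars run p.toList) p0.toList
          = ((p1 :: rest).map String.toList).foldl (fun run t => lcpChars run t) (p0.toList.take p0.toList.length) := by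
        rw [List.take_length, List.foldl_map]
      rw [h0, foldB, ← hNdef, List.length_take]
      omega
    rw [looks_like_independent_binaries_py_alt]
    simp only [Nat.cast_zero] at hA
    show decide (aLoop (p0 :: p1 :: rest) p0 (PySem.List.pyRange 0 (M' : Int) 1) ≤ 3) = _
    rw [hA, hB]
    simp
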